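-- pv_equiv track=rewrite | github.com/YIREN1/Minesweeper | minesweeper.py | row_won
-- ===== SOURCE A (Python) =====
-- def row_won(grid,board,row,col):
--     width = len(grid[0])
--     if col == width:
--         return True
--     else:
--
--         cell = (grid[row][col]and board[row][col] == ' ')\
--             or(not grid[row][col] and board[row][col] != ' ')
--         return cell and row_won(grid,board,row,col+1)
-- ===== SOURCE B (Python) =====
-- def row_won(grid, board, row, col):
--     width = len(grid[0])
--     for c in range(col, width):
--         if (board[row][c] == ' ') != bool(grid[row][c]):
--             return False
--     return True
-- ===== Notes on version B (the rewrite author's own statement) =====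
-- stated objective: idiomatic
-- what changed: Replaced the tail recursion over col with an iterative scan over range(col, width), writing the per-cell test as the boolean equality (board cell blank) == bool(grid cell); Pre_ excludes calls with col > width, on which A is outside its natural 0..width domain and scans past the row end instead of reporting the row checked.
-- outside the precondition, e.g. on row_won([[0], [1, 1, 1]], [['x'], ['x', 'x', 'x']], 1, 2): A returns False, B returns True
import Mathlib
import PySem

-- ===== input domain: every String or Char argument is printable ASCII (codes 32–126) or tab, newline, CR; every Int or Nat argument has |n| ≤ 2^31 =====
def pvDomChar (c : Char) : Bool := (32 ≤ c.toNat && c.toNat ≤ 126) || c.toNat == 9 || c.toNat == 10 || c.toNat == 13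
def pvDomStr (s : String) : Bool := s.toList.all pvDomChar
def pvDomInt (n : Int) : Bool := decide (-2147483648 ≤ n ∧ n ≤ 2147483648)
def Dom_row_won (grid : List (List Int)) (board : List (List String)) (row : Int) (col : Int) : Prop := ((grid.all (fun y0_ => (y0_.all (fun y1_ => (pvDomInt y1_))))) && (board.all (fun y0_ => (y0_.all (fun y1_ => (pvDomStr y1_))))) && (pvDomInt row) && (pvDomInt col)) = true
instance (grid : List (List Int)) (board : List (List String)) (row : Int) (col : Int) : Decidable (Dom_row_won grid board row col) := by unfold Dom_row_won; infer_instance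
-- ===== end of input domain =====

-- ===== PORT A =====
-- B is an iterative scan over range(col, width) with the cell test written as a boolean
-- equality; objective: more idiomatic (the check measured no speed difference).
-- Port of A: the tail recursion on col, with fuel (w - col).toNat; fuel 0 / index
-- failure return false only where the Python raises or diverges (outside Pre_).
def rowWonGoA (grid : List (List Int)) (board : List (List String)) (row : Int) :
    Nat → Int → Bool
  | fuel, col =>
    let width : Int := ((PySem.List.pyGet? grid 0).getD []).length
    if col = width then true
    else
      match fuel with
      | 0 => false
      | fuel + 1 =>
        match PySem.List.pyGet? (PySem.List.pyGetD grid row []) col,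
              PySem.List.pyGet? (PySem.List.pyGetD board row []) col with
        | some g, some b =>
            ((decide (g ≠ 0) && (b == " ")) || (decide (g = 0) && !(b == " ")))
              && rowWonGoA grid board row fuel (col + 1)
        | _, _ => false

def row_won (grid : List (List Int)) (board : List (List String)) (row : Int) (col : Int) : Bool :=
  rowWonGoA grid board row (((((PySem.List.pyGet? grid 0).getD []).length : Int)) - col).toNat col

-- ===== PORT B =====
def row_won_alt (grid : List (List Int)) (board : List (List String)) (row : Int) (col : Int) : Bool :=
  let width : Int := ((PySem.List.pyGet? grid 0).getD []).length
  (PySem.List.pyRange col width 1).all (fun c =>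
    (PySem.List.pyGetD (PySem.List.pyGetD board row []) c "" == " ")
      == decide (PySem.List.pyGetD (PySem.List.pyGetD grid row []) c 0 ≠ 0))

-- ===== PRECONDITION & SPEC =====
-- pvCellPass: the per-cell win test at column c (total via defaults; Pre_ only uses it
-- on cells whose accesses it has already required to be in range).
def pvCellPass (grid : List (List Int)) (board : List (List String)) (row : Int) (c : Int) : Bool :=
  (PySem.List.pyGetD (PySem.List.pyGetD board row []) c "" == " ")
    == decide (PySem.List.pyGetD (PySem.List.pyGetD grid row []) c 0 ≠ 0)

-- Pre_: grid nonempty (A always evaluates len(grid[0])), col ≤ width, the first scanned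
-- cell's accesses in range (unless col = width, where A returns True untouched), and each
-- further scanned column c must have its accesses in range unless an earlier cell already
-- failed the win test (A and B both stop there).  The range start is clamped to the row
-- length only so that deciding Pre_ stays cheap when col is hugely negative (A raises
-- there, so those inputs are outside Pre_ anyway); under the third conjunct the clamp is
-- the identity.  Pre_ excludes col > width, on which A (called outside its natural
-- 0..width domain) scans past the row end until a failing cell or an IndexError instead
-- of reporting the row checked.
def Pre_row_won (grid : List (List Int)) (board : List (List String)) (row : Int) (col : Int) : Prop :=
  grid ≠ [] ∧
  col ≤ ((((PySem.List.pyGet? grid 0).getD []).length : Int)) ∧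
  (col = ((((PySem.List.pyGet? grid 0).getD []).length : Int)) ∨
    (PySem.Raise.InRange grid.length row ∧
     PySem.Raise.InRange board.length row ∧
     PySem.Raise.InRange (PySem.List.pyGetD grid row []).length col ∧
     PySem.Raise.InRange (PySem.List.pyGetD board row []).length col)) ∧
  ∀ c ∈ PySem.List.pyRange
      (max col (-((min (PySem.List.pyGetD grid row []).length (PySem.List.pyGetD board row []).length : Nat) : Int)))
      ((((PySem.List.pyGet? grid 0).getD []).length : Int)) 1,
    (∀ c' ∈ PySem.List.pyRange
        (max col (-((min (PySem.List.pyGetD grid row []).length (PySem.List.pyGetD board row []).length : Nat) : Int)))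
        c 1, pvCellPass grid board row c' = true) →
    (PySem.Raise.InRange (PySem.List.pyGetD grid row []).length c ∧
     PySem.Raise.InRange (PySem.List.pyGetD board row []).length c)
instance (grid : List (List Int)) (board : List (List String)) (row : Int) (col : Int) : Decidable (Pre_row_won grid board row col) := by unfold Pre_row_won; infer_instance

def pvWitness_row_won : List (List Int) × List (List String) × Int × Int :=
  ([[1, 0]], [[" ", "x"]], 0, 0)

def Spec_row_won (grid : List (List Int)) (board : List (List String)) (row : Int) (col : Int) (out : Bool) : Prop := out = row_won_alt grid board row col
instance (grid : List (List Int)) (board : List (List String)) (row : Int) (col : Int) (out : Bool) : Decidable (Spec_row_won grid board row col out) := by unfold Spec_row_won; infer_instance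

-- ===== CLAIM (what is proved, stated in full; the proofs are below) =====
def Claim_equal_row_won : Prop := ∀ (grid : List (List Int)) (board : List (List String)) (row : Int) (col : Int), Dom_row_won grid board row col → Pre_row_won grid board row col → Spec_row_won grid board row col (row_won grid board row col)

-- ===== LEMMAS AND PROOFS =====

lemma rowWonGo_eq_all (grid : List (List Int)) (board : List (List String)) (row : Int) :
    ∀ (fuel : Nat) (col : Int),
      col ≤ ((((PySem.List.pyGet? grid 0).getD []).length : Int)) →
      (((((PySem.List.pyGet? grid 0).getD []).length : Int)) - col).toNat ≤ fuel →
      (∀ c ∈ PySem.List.pyRange col ((((PySem.List.pyGet? grid 0).getD []).length : Int)) 1,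
        (∀ c' ∈ PySem.List.pyRange col c 1, pvCellPass grid board row c' = true) →
        (PySem.Raise.InRange (PySem.List.pyGetD grid row []).length c ∧
         PySem.Raise.InRange (PySem.List.pyGetD board row []).length c)) →
      rowWonGoA grid board row fuel col = row_won_alt grid board row col := by
  intro fuel
  induction fuel with
  | zero =>
    intro col hle hfuel _
    have hcol : col = ((((PySem.List.pyGet? grid 0).getD []).length : Int)) := by omega
    simp [rowWonGoA, row_won_alt, hcol, PySem.List.pyRange_one_eq_nil (le_refl _)]
  | succ fuel ih =>
    intro col hle hfuel hin
    by_cases hcol : col = ((((PySem.List.pyGet? grid 0).getD []).length : Int))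
    · simp [rowWonGoA, row_won_alt, hcol, PySem.List.pyRange_one_eq_nil (le_refl _)]
    · have hlt : col < ((((PySem.List.pyGet? grid 0).getD []).length : Int)) := lt_of_le_of_ne hle hcol
      have hmem : col ∈ PySem.List.pyRange col ((((PySem.List.pyGet? grid 0).getD []).length : Int)) 1 := by
        rw [PySem.List.mem_pyRange_one]; omega
      obtain ⟨hg, hb⟩ := hin col hmem (by
        intro c' hc'
        rw [PySem.List.mem_pyRange_one] at hc'
        omega)
      obtain ⟨g, hgv⟩ : ∃ g, PySem.List.pyGet? (PySem.List.pyGetD grid row []) col = some g := by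
        cases hgv : PySem.List.pyGet? (PySem.List.pyGetD grid row []) col with
        | none => exact absurd hg ((PySem.List.pyGet?_eq_none_iff _ _).mp hgv)
        | some g => exact ⟨g, rfl⟩
      obtain ⟨b, hbv⟩ : ∃ b, PySem.List.pyGet? (PySem.List.pyGetD board row []) col = some b := by
        cases hbv : PySem.List.pyGet? (PySem.List.pyGetD board row []) col with
        | none => exact absurd hb ((PySem.List.pyGet?_eq_none_iff _ _).mp hbv)
        | some b => exact ⟨b, rfl⟩
      have hgd : PySem.List.pyGetD (PySem.List.pyGetD grid row []) col 0 = g := by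
        show (PySem.List.pyGet? (PySem.List.pyGetD grid row []) col).getD 0 = g
        rw [hgv]; rfl
      have hbd : PySem.List.pyGetD (PySem.List.pyGetD board row []) col "" = b := by
        show (PySem.List.pyGet? (PySem.List.pyGetD board row []) col).getD "" = b
        rw [hbv]; rfl
      have hcell : ((decide (g ≠ 0) && (b == " ")) || (decide (g = 0) && !(b == " ")))
          = pvCellPass grid board row col := by
        rw [pvCellPass, hgd, hbd]
        by_cases h0 : g = 0 <;> by_cases hsp : b = " " <;> simp [h0, hsp]
      simp only [row_won_alt]
      rw [PySem.List.pyRange_one_cons hlt, List.all_cons]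
      conv_lhs => rw [rowWonGoA]
      simp only [if_neg hcol, hgv, hbv, hcell]
      rw [show ((PySem.List.pyGetD (PySem.List.pyGetD board row []) col "" == " ")
            == decide (PySem.List.pyGetD (PySem.List.pyGetD grid row []) col 0 ≠ 0))
          = pvCellPass grid board row col from rfl]
      by_cases hp : pvCellPass grid board row col = true
      · have hrec := ih (col + 1) (by omega) (by omega) (by
          intro c hc hall
          apply hin c
          · rw [PySem.List.mem_pyRange_one] at hc ⊢
            omega
          · intro c' hc'
            rw [PySem.List.mem_pyRange_one] at hc'
            by_cases hc'col : c' = col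
            · rw [hc'col]; exact hp
            · apply hall c'
              rw [PySem.List.mem_pyRange_one]
              omega)
        simp only [row_won_alt] at hrec
        rw [hp, hrec]
      · rw [Bool.not_eq_true] at hp
        rw [hp, Bool.false_and, Bool.false_and]

-- ===== VERDICT (by name: the statement is the Claim_ definition above) =====
theorem row_won_spec : Claim_equal_row_won := by
  intro grid board row col _ hpre
  obtain ⟨hne, hle, hcase, hall⟩ := hpre
  by_cases hcw : col = ((((PySem.List.pyGet? grid 0).getD []).length : Int))
  · refine rowWonGo_eq_all grid board row _ col hle (le_refl _) ?_
    intro c hc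
    rw [hcw, PySem.List.pyRange_one_eq_nil (le_refl _)] at hc
    cases hc
  · rcases hcase with hcw' | ⟨-, -, hgc, hbc⟩
    · exact absurd hcw' hcw
    · have hmax : max col (-((min (PySem.List.pyGetD grid row []).length (PySem.List.pyGetD board row []).length : Nat) : Int)) = col := by
        obtain ⟨hg1, -⟩ := hgc
        obtain ⟨hb1, -⟩ := hbc
        have := Nat.min_le_left (PySem.List.pyGetD grid row []).length (PySem.List.pyGetD board row []).length
        have := Nat.min_le_right (PySem.List.pyGetD grid row []).length (PySem.List.pyGetD board row []).length
        omega
      rw [hmax] at hall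
      exact rowWonGo_eq_all grid board row _ col hle (le_refl _) hall
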